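-- pv_equiv track=rewrite | github.com/soodt/nlp_3 | NLP_asgn_2/Unk_main.py | parseTrainingOOV
-- ===== SOURCE A (Python) =====
-- def countTokenOccurences(sentences):
--     tokenOccurences = {}
--
--     for sentence in sentences:
--         for token in sentence:
--             if token in tokenOccurences:
--                 tokenOccurences[token] += 1
--             else:
--                 tokenOccurences[token] = 1
--
--     return tokenOccurences
--
-- def parseTrainingOOV(sentences, margin):
--
--     new_sentences = []
--     vocabulary = set()
--     tokenOccurences = countTokenOccurences(sentences)
--
--     for key, value in tokenOccurences.items():
--         if (value > margin):
--             vocabulary.add(key)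
--     vocabulary.add("<UNK>")
--
--     for sentence in sentences:
--         new_sentence2 = []
--         for token in sentence:
--             if (token in vocabulary):
--                 new_sentence2.append(token)
--             else:
--                 new_sentence2.append("<UNK>")
--         new_sentences.append(new_sentence2)
--
--     return new_sentences, vocabulary
-- ===== SOURCE B (Python) =====
-- def parseTrainingOOV(sentences, margin):
--     # inverted index: token -> list of (sentence index, position) occurrences
--     positions = {}
--     for i, sentence in enumerate(sentences):
--         for j, token in enumerate(sentence):
--             positions.setdefault(token, []).append((i, j))
--
--     vocabulary = {token for token, occ in positions.items() if len(occ) > margin}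
--     vocabulary.add("<UNK>")
--
--     # scatter-write "<UNK>" into a copy of the corpus at the positions of rare tokens
--     new_sentences = [list(sentence) for sentence in sentences]
--     for token, occ in positions.items():
--         if len(occ) <= margin:
--             for i, j in occ:
--                 new_sentences[i][j] = "<UNK>"
--     return new_sentences, vocabulary
-- ===== Notes on version B (the rewrite author's own statement) =====
-- stated objective: alternative
-- what changed: B builds an inverted index token -> list of (sentence,position) occurrences, derives the vocabulary from occurrence-list lengths, and rewrites the corpus by scatter-writing '<UNK>' into a copy at the recorded positions of the rare tokens, instead of A's count dict plus a second full pass testing every token's membership in the vocabulary.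
import Mathlib
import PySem

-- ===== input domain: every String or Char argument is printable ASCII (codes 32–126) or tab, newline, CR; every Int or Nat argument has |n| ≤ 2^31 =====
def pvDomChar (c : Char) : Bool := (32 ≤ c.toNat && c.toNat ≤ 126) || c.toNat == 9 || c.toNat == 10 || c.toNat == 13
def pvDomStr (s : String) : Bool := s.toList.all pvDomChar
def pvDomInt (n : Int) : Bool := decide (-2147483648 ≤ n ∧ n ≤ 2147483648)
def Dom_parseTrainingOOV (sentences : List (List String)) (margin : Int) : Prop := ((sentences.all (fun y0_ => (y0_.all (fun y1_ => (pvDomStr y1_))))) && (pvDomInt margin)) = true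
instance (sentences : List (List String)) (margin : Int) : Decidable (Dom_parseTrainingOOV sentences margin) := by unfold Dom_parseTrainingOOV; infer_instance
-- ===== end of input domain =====

-- B replaces A's count-then-membership-rewrite with an inverted index (token -> occurrence
-- positions) and scatter-writes "<UNK>" into a copy of the corpus at the rare positions
-- (objective: alternative).

-- ===== PORT A =====
def countTokenOccurences (sentences : List (List String)) : PySem.Dict String Int :=
  sentences.foldl (fun d sentence =>
    sentence.foldl (fun d token =>
      if d.contains token then d.insert token (d.getD token 0 + 1)
      else d.insert token 1) d) (PySem.Dict.empty : PySem.Dict String Int)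

def parseTrainingOOV (sentences : List (List String)) (margin : Int) : List (List String) × List String :=
  let tokenOccurences := countTokenOccurences sentences
  let vocabulary : PySem.Set String :=
    tokenOccurences.items.foldl
      (fun v kv => if kv.2 > margin then PySem.Set.add v kv.1 else v) PySem.Set.empty
  let vocabulary := PySem.Set.add vocabulary "<UNK>"
  let new_sentences : List (List String) :=
    sentences.foldl (fun acc sentence =>
      acc ++ [sentence.foldl (fun ns token =>
        if PySem.Set.contains vocabulary token then ns ++ [token] else ns ++ ["<UNK>"]) []]) []
  (new_sentences, vocabulary)

-- ===== PORT B =====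
-- Python's `new_sentences[i][j] = v`; the indices come from enumerate, hence are nonnegative,
-- so `.toNat` at the call sites is exact.
def setCell (ns : List (List String)) (i j : Nat) (v : String) : List (List String) :=
  ns.set i ((ns.getD i []).set j v)

def parseTrainingOOV_alt (sentences : List (List String)) (margin : Int) : List (List String) × List String :=
  let positions : PySem.Dict String (List (Int × Int)) :=
    (PySem.List.enumerate sentences 0).foldl (fun d is =>
      (PySem.List.enumerate is.2 0).foldl (fun d jt =>
        d.modify jt.2 [] (· ++ [(is.1, jt.1)])) d) PySem.Dict.empty
  let vocabulary : PySem.Set String :=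
    PySem.Set.add (PySem.Set.ofList
      ((positions.items.filter (fun kv => (kv.2.length : Int) > margin)).map (·.1))) "<UNK>"
  let new_sentences : List (List String) :=
    positions.items.foldl (fun ns kv =>
      if (kv.2.length : Int) ≤ margin then
        kv.2.foldl (fun ns p => setCell ns p.1.toNat p.2.toNat "<UNK>") ns
      else ns) (sentences.map (fun s => s))
  (new_sentences, vocabulary)

-- ===== PRECONDITION & SPEC =====
def Spec_parseTrainingOOV (sentences : List (List String)) (margin : Int) (out : List (List String) × List String) : Prop := out = parseTrainingOOV_alt sentences margin
instance (sentences : List (List String)) (margin : Int) (out : List (List String) × List String) : Decidable (Spec_parseTrainingOOV sentences margin out) := by unfold Spec_parseTrainingOOV; infer_instance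

-- ===== CLAIM =====
def Claim_equal_parseTrainingOOV : Prop := ∀ (sentences : List (List String)) (margin : Int), Dom_parseTrainingOOV sentences margin → Spec_parseTrainingOOV sentences margin (parseTrainingOOV sentences margin)

-- ===== LEMMAS AND PROOFS =====

-- the token stream with its (sentence, position) coordinates, as B's nested loops visit it
def flatPairs (sentences : List (List String)) : List (String × (Int × Int)) :=
  ((PySem.List.enumerate sentences 0).map (fun is =>
    (PySem.List.enumerate is.2 0).map (fun jt => (jt.2, (is.1, jt.1))))).flatten

def posDict (sentences : List (List String)) : PySem.Dict String (List (Int × Int)) :=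
  (flatPairs sentences).foldl (fun d p => d.modify p.1 [] (· ++ [p.2])) PySem.Dict.empty

-- cell access used throughout the scatter-write reasoning
def cell (ns : List (List String)) (i j : Nat) : String := (ns.getD i []).getD j ""

def wfold (ws : List (Int × Int)) (ns : List (List String)) : List (List String) :=
  ws.foldl (fun ns p => setCell ns p.1.toNat p.2.toNat "<UNK>") ns

-- the two components of each port, named for the assembly proof
def vocabA (sentences : List (List String)) (margin : Int) : PySem.Set String :=
  PySem.Set.add ((countTokenOccurences sentences).items.foldl
    (fun v kv => if kv.2 > margin then PySem.Set.add v kv.1 else v) PySem.Set.empty) "<UNK>"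

def vocabB (sentences : List (List String)) (margin : Int) : PySem.Set String :=
  PySem.Set.add (PySem.Set.ofList
    (((posDict sentences).items.filter (fun kv => (kv.2.length : Int) > margin)).map (·.1))) "<UNK>"

def nsA (sentences : List (List String)) (margin : Int) : List (List String) :=
  sentences.foldl (fun acc sentence =>
    acc ++ [sentence.foldl (fun ns token =>
      if PySem.Set.contains (vocabA sentences margin) token then ns ++ [token]
      else ns ++ ["<UNK>"]) []]) []

def nsB (sentences : List (List String)) (margin : Int) : List (List String) :=
  (posDict sentences).items.foldl (fun ns kv =>
    if (kv.2.length : Int) ≤ margin then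
      kv.2.foldl (fun ns p => setCell ns p.1.toNat p.2.toNat "<UNK>") ns
    else ns) (sentences.map (fun s => s))

theorem parseTrainingOOV_eq_pair (sentences : List (List String)) (margin : Int) :
    parseTrainingOOV sentences margin = (nsA sentences margin, vocabA sentences margin) := rfl

theorem posDict_eq (sentences : List (List String)) :
    (PySem.List.enumerate sentences 0).foldl (fun d is =>
      (PySem.List.enumerate is.2 0).foldl (fun d jt =>
        d.modify jt.2 [] (· ++ [(is.1, jt.1)])) d) PySem.Dict.empty
    = posDict sentences := by
  unfold posDict flatPairs
  rw [List.foldl_flatten, List.foldl_map]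
  have h : (fun (d : PySem.Dict String (List (Int × Int))) (is : Int × List String) =>
      (PySem.List.enumerate is.2 0).foldl (fun d jt =>
        d.modify jt.2 [] (· ++ [(is.1, jt.1)])) d)
      = fun d is => ((PySem.List.enumerate is.2 0).map
          (fun jt => (jt.2, (is.1, jt.1)))).foldl (fun d p => d.modify p.1 [] (· ++ [p.2])) d := by
    funext d is
    rw [List.foldl_map]
  rw [h]

theorem parseTrainingOOV_alt_eq_pair (sentences : List (List String)) (margin : Int) :
    parseTrainingOOV_alt sentences margin = (nsB sentences margin, vocabB sentences margin) := by
  unfold parseTrainingOOV_alt nsB vocabB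
  rw [posDict_eq]

theorem getD_posDict (sentences : List (List String)) (t : String) :
    (posDict sentences).getD t []
    = ((flatPairs sentences).filter (fun p => p.1 == t)).map (·.2) := by
  unfold posDict
  rw [PySem.Dict.getD_foldl_modify_append]
  simp [PySem.Dict.getD, PySem.Dict.get?, PySem.Dict.empty]

theorem fst_flatPairs (sentences : List (List String)) :
    (flatPairs sentences).map (·.1) = sentences.flatten := by
  unfold flatPairs
  rw [List.map_flatten, List.map_map]
  have h2 : ∀ is : Int × List String,
      (((PySem.List.enumerate is.2 0).map (fun jt => (jt.2, (is.1, jt.1)))).map (·.1)) = is.2 := by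
    intro is
    rw [List.map_map]
    exact PySem.List.map_snd_enumerate is.2 0
  calc ((PySem.List.enumerate sentences 0).map (fun is =>
          ((PySem.List.enumerate is.2 0).map (fun jt => (jt.2, (is.1, jt.1)))).map (·.1))).flatten
      = ((PySem.List.enumerate sentences 0).map (fun is => is.2)).flatten := by
        rw [List.map_congr_left (fun is _ => h2 is)]
    _ = sentences.flatten := by rw [PySem.List.map_snd_enumerate]

theorem length_getD_posDict (sentences : List (List String)) (t : String) :
    ((posDict sentences).getD t []).length = sentences.flatten.count t := by
  rw [getD_posDict, List.length_map, ← fst_flatPairs, List.count, List.countP_map,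
    ← List.countP_eq_length_filter]
  rfl

theorem keys_posDict (sentences : List (List String)) :
    (posDict sentences).keys = PySem.Set.ofList sentences.flatten := by
  unfold posDict
  have h := PySem.Dict.keys_foldl_modify_key (flatPairs sentences) (fun p => p.1)
    ([] : List (Int × Int)) (fun _ p old => old ++ [p.2]) PySem.Dict.empty
  beta_reduce at h
  rw [h, ← fst_flatPairs]
  have hk : (PySem.Dict.empty : PySem.Dict String (List (Int × Int))).keys = [] := rfl
  rw [hk, PySem.Set.update_nil_left]

theorem nodup_keys_posDict (sentences : List (List String)) :
    (posDict sentences).keys.Nodup := by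
  rw [keys_posDict]
  exact PySem.Set.nodup_ofList _

theorem items_posDict (sentences : List (List String)) :
    (posDict sentences).items
    = (PySem.Set.ofList sentences.flatten).map (fun k => (k, (posDict sentences).getD k [])) := by
  rw [← keys_posDict sentences]
  exact PySem.Dict.items_eq_map_keys _ (nodup_keys_posDict sentences) []

theorem mem_getD_posDict (sentences : List (List String)) (t : String) (p : Int × Int) :
    p ∈ (posDict sentences).getD t [] ↔ (t, p) ∈ flatPairs sentences := by
  rw [getD_posDict]
  constructor
  · intro h
    rcases List.mem_map.mp h with ⟨q, hq, hq2⟩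
    rcases List.mem_filter.mp hq with ⟨hqm, hqt⟩
    have h1 : q.1 = t := by simpa using hqt
    have h2 : q = (t, p) := by cases q; simp_all
    rw [← h2]; exact hqm
  · intro h
    exact List.mem_map.mpr ⟨(t, p), List.mem_filter.mpr ⟨h, by simp⟩, rfl⟩

-- coordinate characterisation of flatPairs membership
theorem mem_flatPairs_iff (sentences : List (List String)) (t : String) (p : Int × Int) :
    (t, p) ∈ flatPairs sentences
    ↔ ∃ (i : Nat) (hi : i < sentences.length) (j : Nat) (hj : j < sentences[i].length),
        p = ((i : Int), (j : Int)) ∧ sentences[i][j] = t := by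
  unfold flatPairs
  simp only [List.mem_flatten, List.mem_map]
  constructor
  · rintro ⟨row, ⟨is, his, rfl⟩, hmem⟩
    rcases List.mem_map.mp hmem with ⟨jt, hjt, heq⟩
    rcases (PySem.List.mem_enumerate_iff _ _ _).mp his with ⟨i, hi, rfl⟩
    rcases (PySem.List.mem_enumerate_iff _ _ _).mp hjt with ⟨j, hj, rfl⟩
    refine ⟨i, hi, j, hj, ?_, ?_⟩
    · have := congrArg Prod.snd heq
      simpa using this.symm
    · have := congrArg Prod.fst heq
      simpa using this
  · rintro ⟨i, hi, j, hj, rfl, rfl⟩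
    refine ⟨(PySem.List.enumerate sentences[i] 0).map
        (fun jt => (jt.2, ((0 : Int) + (i : Int), jt.1))), ⟨((0 : Int) + (i : Int), sentences[i]), ?_, rfl⟩, ?_⟩
    · exact (PySem.List.mem_enumerate_iff _ _ _).mpr ⟨i, hi, rfl⟩
    · refine List.mem_map.mpr ⟨((0 : Int) + (j : Int), sentences[i][j]), ?_, by simp⟩
      exact (PySem.List.mem_enumerate_iff _ _ _).mpr ⟨j, hj, rfl⟩

-- every recorded coordinate is nonnegative
theorem flatPairs_nonneg (sentences : List (List String)) :
    ∀ q ∈ flatPairs sentences, 0 ≤ q.2.1 ∧ 0 ≤ q.2.2 := by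
  intro q hq
  obtain ⟨t, p, rfl⟩ : ∃ t p, q = (t, p) := ⟨q.1, q.2, rfl⟩
  rcases (mem_flatPairs_iff sentences t p).mp hq with ⟨i, _, j, _, rfl, _⟩
  exact ⟨Int.natCast_nonneg i, Int.natCast_nonneg j⟩

-- ---- shape and cell lemmas for the scatter write ----

theorem getD_set' {α : Type} (l : List α) (i : Nat) (a d : α) (j : Nat) :
    (l.set i a).getD j d = if i = j ∧ i < l.length then a else l.getD j d := by
  simp only [List.getD, List.getElem?_set]
  split_ifs with h1 h2 h3 <;> simp_all <;> omega

theorem length_setCell (ns : List (List String)) (a b : Nat) (v : String) :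
    (setCell ns a b v).length = ns.length := List.length_set ..

theorem rowlen_setCell (ns : List (List String)) (a b : Nat) (v : String) (i : Nat) :
    ((setCell ns a b v).getD i []).length = (ns.getD i []).length := by
  unfold setCell
  rw [getD_set']
  split_ifs with h
  · rw [← h.1, List.length_set]
  · rfl

theorem cell_setCell (ns : List (List String)) (a b : Nat) (v : String) (i j : Nat) :
    cell (setCell ns a b v) i j
    = if a = i ∧ b = j ∧ a < ns.length ∧ b < (ns.getD a []).length then v
      else cell ns i j := by
  unfold cell setCell
  rw [getD_set']
  by_cases h1 : a = i ∧ a < ns.length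
  · rw [if_pos h1]
    obtain ⟨rfl, hlen⟩ := h1
    rw [getD_set']
    by_cases h2 : b = j ∧ b < (ns.getD a []).length
    · rw [if_pos h2, if_pos ⟨rfl, h2.1, hlen, h2.2⟩]
    · rw [if_neg h2, if_neg (fun h => h2 ⟨h.2.1, h.2.2.2⟩)]
  · rw [if_neg h1, if_neg (fun h => h1 ⟨h.1, h.2.2.1⟩)]

theorem length_wfold (ws : List (Int × Int)) (ns : List (List String)) :
    (wfold ws ns).length = ns.length := by
  induction ws generalizing ns with
  | nil => rfl
  | cons p ws ih => rw [wfold, List.foldl_cons, ← wfold, ih, length_setCell]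

theorem rowlen_wfold (ws : List (Int × Int)) (ns : List (List String)) (i : Nat) :
    ((wfold ws ns).getD i []).length = (ns.getD i []).length := by
  induction ws generalizing ns with
  | nil => rfl
  | cons p ws ih => rw [wfold, List.foldl_cons, ← wfold, ih, rowlen_setCell]

theorem cell_wfold (ws : List (Int × Int)) (ns : List (List String)) (i j : Nat)
    (hnn : ∀ p ∈ ws, 0 ≤ p.1 ∧ 0 ≤ p.2) :
    cell (wfold ws ns) i j
    = if ((i : Int), (j : Int)) ∈ ws ∧ i < ns.length ∧ j < (ns.getD i []).length
      then "<UNK>" else cell ns i j := by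
  induction ws generalizing ns with
  | nil => simp [wfold]
  | cons p ws ih =>
    rw [wfold, List.foldl_cons, ← wfold,
      ih _ (fun q hq => hnn q (List.mem_cons_of_mem _ hq)),
      length_setCell, rowlen_setCell, cell_setCell]
    have hp := hnn p (List.mem_cons_self ..)
    have hiff : (p.1.toNat = i ∧ p.2.toNat = j ∧ p.1.toNat < ns.length ∧
        p.2.toNat < (ns.getD p.1.toNat []).length)
        ↔ (p = ((i : Int), (j : Int)) ∧ i < ns.length ∧ j < (ns.getD i []).length) := by
      obtain ⟨pa, pb⟩ := p
      obtain ⟨ha, hb⟩ := hp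
      constructor
      · rintro ⟨h1, h2, h3, h4⟩
        have hpa : pa = (i : Int) := by omega
        have hpb : pb = (j : Int) := by omega
        subst hpa; subst hpb
        refine ⟨rfl, by omega, ?_⟩
        simpa using h4
      · rintro ⟨heq, h3, h4⟩
        obtain ⟨h1, h2⟩ := Prod.mk.injEq .. ▸ heq
        refine ⟨by omega, by omega, by omega, ?_⟩
        have hpa : pa.toNat = i := by omega
        rw [hpa]; omega
    simp only [hiff]
    by_cases hR : i < ns.length ∧ j < (ns.getD i []).length
    · have hj' : j < ns[i].length := by
        have hh := hR.2
        rwa [List.getD_eq_getElem _ _ hR.1] at hh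
      by_cases hw : ((i : Int), (j : Int)) ∈ ws
      · simp [hw, hR.1, hj']
      · by_cases hpe : p = ((i : Int), (j : Int))
        · simp [hw, hR.1, hj', hpe, List.mem_cons]
        · have hpe' : ¬(((i : Int), (j : Int)) = p) := fun h => hpe h.symm
          simp [hw, hR.1, hj', hpe, hpe', List.mem_cons]
    · rw [if_neg (fun h => hR ⟨h.2.1, h.2.2⟩), if_neg (fun h => hR ⟨h.2.1, h.2.2⟩),
        if_neg (fun h => hR ⟨h.2.1, h.2.2⟩)]

-- ---- the write set of B ----

def wsB (sentences : List (List String)) (margin : Int) : List (Int × Int) :=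
  (((posDict sentences).items.filter
    (fun kv => (kv.2.length : Int) ≤ margin)).map (·.2)).flatten

theorem wsB_nonneg (sentences : List (List String)) (margin : Int) :
    ∀ p ∈ wsB sentences margin, 0 ≤ p.1 ∧ 0 ≤ p.2 := by
  intro p hp
  rcases List.mem_flatten.mp hp with ⟨occ, hocc, hpocc⟩
  rcases List.mem_map.mp hocc with ⟨kv, hkv, rfl⟩
  have hkv' := (List.mem_filter.mp hkv).1
  rw [items_posDict] at hkv'
  rcases List.mem_map.mp hkv' with ⟨k, _, rfl⟩
  have := (mem_getD_posDict sentences k p).mp hpocc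
  exact flatPairs_nonneg sentences (k, p) this

theorem nsB_eq_wfold (sentences : List (List String)) (margin : Int) :
    nsB sentences margin = wfold (wsB sentences margin) (sentences.map (fun s => s)) := by
  unfold nsB wsB wfold
  rw [PySem.List.foldl_ite_eq_foldl_filter
    (p := fun kv : String × List (Int × Int) => (kv.2.length : Int) ≤ margin)
    (f := fun ns kv => kv.2.foldl (fun ns p => setCell ns p.1.toNat p.2.toNat "<UNK>") ns),
    List.foldl_flatten, List.foldl_map]

-- membership in the write set, for an in-range cell
theorem mem_wsB_iff (sentences : List (List String)) (margin : Int) (i j : Nat)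
    (hi : i < sentences.length) (hj : j < sentences[i].length) :
    (((i : Int), (j : Int)) ∈ wsB sentences margin)
    ↔ (sentences.flatten.count sentences[i][j] : Int) ≤ margin := by
  unfold wsB
  constructor
  · intro h
    rcases List.mem_flatten.mp h with ⟨occ, hocc, hpocc⟩
    rcases List.mem_map.mp hocc with ⟨kv, hkv, rfl⟩
    obtain ⟨hkvm, hkvlen⟩ := List.mem_filter.mp hkv
    rw [items_posDict] at hkvm
    rcases List.mem_map.mp hkvm with ⟨k, _, rfl⟩
    have hk := (mem_getD_posDict sentences k _).mp hpocc
    rcases (mem_flatPairs_iff sentences k _).mp hk with ⟨i', hi', j', hj', heq, hkeq⟩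
    have hii : i' = i ∧ j' = j := by
      obtain ⟨e1, e2⟩ := Prod.mk.injEq .. ▸ heq.symm
      exact ⟨by omega, by omega⟩
    obtain ⟨rfl, rfl⟩ := hii
    rw [hkeq]
    simp only [length_getD_posDict, decide_eq_true_eq] at hkvlen
    exact hkvlen
  · intro h
    set t := sentences[i][j] with ht
    have htf : t ∈ sentences.flatten :=
      List.mem_flatten.mpr ⟨sentences[i], List.getElem_mem hi, List.getElem_mem hj⟩
    refine List.mem_flatten.mpr ⟨(posDict sentences).getD t [], ?_, ?_⟩
    · refine List.mem_map.mpr ⟨(t, (posDict sentences).getD t []), List.mem_filter.mpr ⟨?_, ?_⟩, rfl⟩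
      · rw [items_posDict]
        exact List.mem_map.mpr ⟨t, (PySem.Set.mem_ofList _ _).mpr htf, rfl⟩
      · simp only [length_getD_posDict]
        simpa using h
    · exact (mem_getD_posDict sentences t _).mpr
        ((mem_flatPairs_iff sentences t _).mpr ⟨i, hi, j, hj, rfl, rfl⟩)

-- ---- the A side, reduced to a map and a membership test ----

theorem counts_eq_counter (sentences : List (List String)) :
    countTokenOccurences sentences = PySem.Dict.counter sentences.flatten := by
  unfold countTokenOccurences
  have hstep : (fun (d : PySem.Dict String Int) (token : String) =>
      if d.contains token then d.insert token (d.getD token 0 + 1) else d.insert token 1)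
      = fun d t => d.insert t (d.getD t 0 + 1) := by
    funext d t
    by_cases hc : d.contains t = true
    · simp [hc]
    · have hc' : d.contains t = false := by simpa using hc
      rw [if_neg (by simp [hc']), PySem.Dict.getD_of_not_contains d 0 hc']
      norm_num
  rw [hstep, ← List.foldl_flatten]
  exact PySem.Dict.foldl_insert_getD_add_one_eq_counter _

-- the common closed form of both vocabularies
def vocabC (sentences : List (List String)) (margin : Int) : PySem.Set String :=
  PySem.Set.add ((PySem.Set.ofList sentences.flatten).filter
    (fun k => (sentences.flatten.count k : Int) > margin)) "<UNK>"

theorem vocabA_eq (sentences : List (List String)) (margin : Int) :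
    vocabA sentences margin = vocabC sentences margin := by
  unfold vocabA vocabC
  rw [counts_eq_counter]
  rw [PySem.List.foldl_ite_eq_foldl_filter
    (p := fun kv : String × Int => kv.2 > margin)
    (f := fun (v : PySem.Set String) (kv : String × Int) => PySem.Set.add v kv.1)]
  rw [← PySem.Set.update_map_eq_foldl_add]
  have hemp : (PySem.Set.empty : PySem.Set String) = [] := rfl
  rw [hemp, PySem.Set.update_nil_left]
  rw [PySem.Dict.items_counter, List.filter_map, List.map_map]
  have h1 : (((fun x : String × Int => x.1)) ∘
      (fun k : String => (k, (sentences.flatten.count k : Int)))) = id := rfl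
  rw [h1, List.map_id]
  congr 1
  have h2 : ((PySem.Set.ofList sentences.flatten).filter
      (((fun kv : String × Int => decide (kv.2 > margin))) ∘
        (fun k : String => (k, (sentences.flatten.count k : Int)))))
      = (PySem.Set.ofList sentences.flatten).filter
        (fun k => (sentences.flatten.count k : Int) > margin) := by
    exact List.filter_congr (fun k _ => by simp)
  rw [← h2]
  have h3 : PySem.Set.ofList ((PySem.Set.ofList sentences.flatten).filter
      (((fun kv : String × Int => decide (kv.2 > margin))) ∘
        (fun k : String => (k, (sentences.flatten.count k : Int)))))
      = (PySem.Set.ofList sentences.flatten).filter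
        (((fun kv : String × Int => decide (kv.2 > margin))) ∘
          (fun k : String => (k, (sentences.flatten.count k : Int)))) :=
    PySem.Set.ofList_eq_self_of_nodup _ ((PySem.Set.nodup_ofList _).filter _)
  rw [h3]

theorem vocabB_eq (sentences : List (List String)) (margin : Int) :
    vocabB sentences margin = vocabC sentences margin := by
  unfold vocabB vocabC
  rw [items_posDict, List.filter_map, List.map_map]
  have h1 : (((fun x : String × List (Int × Int) => x.1)) ∘
      (fun k : String => (k, (posDict sentences).getD k []))) = id := rfl
  rw [h1, List.map_id]
  congr 1
  have h2 : ((PySem.Set.ofList sentences.flatten).filter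
      (((fun kv : String × List (Int × Int) => decide ((kv.2.length : Int) > margin))) ∘
        (fun k : String => (k, (posDict sentences).getD k []))))
      = (PySem.Set.ofList sentences.flatten).filter
        (fun k => (sentences.flatten.count k : Int) > margin) := by
    refine List.filter_congr (fun k _ => ?_)
    simp [length_getD_posDict]
  rw [h2]
  exact PySem.Set.ofList_eq_self_of_nodup _ ((PySem.Set.nodup_ofList _).filter _)

theorem mem_vocabC_iff (sentences : List (List String)) (margin : Int) (t : String)
    (ht : t ∈ sentences.flatten) :
    t ∈ vocabC sentences margin
    ↔ ((sentences.flatten.count t : Int) > margin ∨ t = "<UNK>") := by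
  unfold vocabC
  rw [PySem.Set.mem_add]
  constructor
  · rintro (hm | he)
    · left
      have := (List.mem_filter.mp hm).2
      simpa using this
    · right; exact he
  · rintro (hgt | he)
    · left
      exact List.mem_filter.mpr ⟨(PySem.Set.mem_ofList _ _).mpr ht, by simpa using hgt⟩
    · right; exact he

theorem nsA_eq_map (sentences : List (List String)) (margin : Int) :
    nsA sentences margin
    = sentences.map (fun s => s.map (fun t =>
        if PySem.Set.contains (vocabA sentences margin) t then t else "<UNK>")) := by
  unfold nsA
  have hif : (fun (ns : List String) (token : String) =>
      if PySem.Set.contains (vocabA sentences margin) token then ns ++ [token]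
      else ns ++ ["<UNK>"])
      = fun ns token => ns ++ [if PySem.Set.contains (vocabA sentences margin) token
          then token else "<UNK>"] := by
    funext ns token; split <;> rfl
  have houter : (fun (acc : List (List String)) (sentence : List String) =>
      acc ++ [sentence.foldl (fun ns token =>
        if PySem.Set.contains (vocabA sentences margin) token then ns ++ [token]
        else ns ++ ["<UNK>"]) []])
      = fun acc sentence => acc ++ [sentence.map (fun t =>
          if PySem.Set.contains (vocabA sentences margin) t then t else "<UNK>")] := by
    funext acc sentence
    rw [hif, PySem.List.foldl_append_singleton_eq_map]
    rfl
  rw [houter, PySem.List.foldl_append_singleton_eq_map, List.nil_append]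

-- ---- the assembly ----

theorem ns_eq (sentences : List (List String)) (margin : Int) :
    nsA sentences margin = nsB sentences margin := by
  rw [nsA_eq_map, nsB_eq_wfold, List.map_id']
  apply List.ext_getElem
  · rw [List.length_map, length_wfold]
  intro i h1 h2
  have hi : i < sentences.length := by rwa [length_wfold] at h2
  rw [List.getElem_map]
  apply List.ext_getElem
  · rw [List.length_map]
    have e1 : (wfold (wsB sentences margin) sentences)[i]
        = (wfold (wsB sentences margin) sentences).getD i [] :=
      (List.getD_eq_getElem _ _ h2).symm
    rw [e1, rowlen_wfold, List.getD_eq_getElem _ _ hi]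
  intro j h3 h4
  rw [List.getElem_map]
  have h3' : j < sentences[i].length := by rwa [List.length_map] at h3
  have hcell : (wfold (wsB sentences margin) sentences)[i][j]
      = cell (wfold (wsB sentences margin) sentences) i j := by
    unfold cell
    rw [List.getD_eq_getElem _ _ h2, List.getD_eq_getElem _ _ h4]
  rw [hcell, cell_wfold _ _ _ _ (wsB_nonneg sentences margin)]
  have hrange : i < sentences.length ∧ j < (sentences.getD i []).length := by
    refine ⟨hi, ?_⟩
    rw [List.getD_eq_getElem _ _ hi]
    exact h3'
  have hcs : cell sentences i j = sentences[i][j] := by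
    unfold cell
    rw [List.getD_eq_getElem _ _ hi, List.getD_eq_getElem _ _ h3']
  set t := sentences[i][j] with htdef
  have htf : t ∈ sentences.flatten :=
    List.mem_flatten.mpr ⟨sentences[i], List.getElem_mem hi, List.getElem_mem h3'⟩
  rw [vocabA_eq]
  by_cases hle : (sentences.flatten.count t : Int) ≤ margin
  · have hcond : ((i : Int), (j : Int)) ∈ wsB sentences margin
        ∧ i < sentences.length ∧ j < (sentences.getD i []).length :=
      ⟨(mem_wsB_iff sentences margin i j hi h3').mpr hle, hrange⟩
    rw [if_pos hcond]
    by_cases hu : t = "<UNK>"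
    · have hc : PySem.Set.contains (vocabC sentences margin) t = true :=
        (PySem.Set.contains_iff _ _).mpr ((mem_vocabC_iff sentences margin t htf).mpr (Or.inr hu))
      simp [hu]
    · have hc : PySem.Set.contains (vocabC sentences margin) t = false := by
        refine Bool.eq_false_iff.mpr (fun h => ?_)
        rcases (mem_vocabC_iff sentences margin t htf).mp
          ((PySem.Set.contains_iff _ _).mp h) with hg | he
        · omega
        · exact hu he
      have hnotmem : t ∉ vocabC sentences margin := fun hm =>
        (Bool.eq_false_iff.mp hc) ((PySem.Set.contains_iff _ _).mpr hm)
      simp [hnotmem]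
  · have hgt : (sentences.flatten.count t : Int) > margin := by omega
    have hnm : ¬(((i : Int), (j : Int)) ∈ wsB sentences margin
        ∧ i < sentences.length ∧ j < (sentences.getD i []).length) :=
      fun h => hle ((mem_wsB_iff sentences margin i j hi h3').mp h.1)
    have hc : PySem.Set.contains (vocabC sentences margin) t = true :=
      (PySem.Set.contains_iff _ _).mpr ((mem_vocabC_iff sentences margin t htf).mpr (Or.inl hgt))
    simp only [hc, if_true]
    rw [if_neg hnm, hcs]

theorem parseTrainingOOV_spec_aux (sentences : List (List String)) (margin : Int) :
    parseTrainingOOV sentences margin = parseTrainingOOV_alt sentences margin := by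
  rw [parseTrainingOOV_eq_pair, parseTrainingOOV_alt_eq_pair, ns_eq, vocabA_eq, vocabB_eq]

-- ===== VERDICT =====
theorem parseTrainingOOV_spec : Claim_equal_parseTrainingOOV := by
  intro sentences margin _
  unfold Spec_parseTrainingOOV
  exact parseTrainingOOV_spec_aux sentences margin
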